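-- pv_equiv track=rewrite | github.com/nguyenxtan/api4chatbot | src/core/markdown_to_bullet.py | _reorder_table_headings
-- ===== SOURCE A (Python) =====
-- def _reorder_table_headings(markdown_content: str) -> str:
--     """
--     Fix markdown structure for proper table handling.
--
--     Fixes two issues:
--     1. Rejoin multi-line table cells that were split by PDF extraction
--     2. Ensure 'Bảng XX' headings appear before their tables
--     """
--     lines = markdown_content.split('\n')
--
--     # Step 1: Rejoin multi-line table cells
--     # When a table row starts with |, subsequent lines that contain | are cell continuations
--     result = []
--     i = 0
--     while i < len(lines):
--         if lines[i].strip().startswith('|'):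
--             # This is a table row
--             combined_row = lines[i]
--             i += 1
--
--             # Collect all continuation lines (those that don't start with | but are part of the row)
--             # Look ahead to determine if subsequent lines are continuations or not
--             while i < len(lines) and not lines[i].strip().startswith('|'):
--                 # Peek at next lines to determine if we should keep collecting
--                 # If next non-empty line doesn't start with | and has |, it's likely a continuation
--                 # If it's empty or doesn't have |, check further ahead
--
--                 current_line = lines[i]
--                 if '|' in current_line:
--                     # This line has pipes - likely a continuation
--                     combined_row += ' ' + current_line.strip()
--                     i += 1
--                 elif current_line.strip() == '':
--                     # Empty line - might be end of table, don't include
--                     break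
--                 else:
--                     # No pipes at start, might be continuation of previous cell
--                     # Look ahead to find next line that either:
--                     # 1. Starts with | (definitely a table row)
--                     # 2. Has pipes (likely cell content continuation)
--                     # 3. Is empty (gap in table)
--                     next_idx = i + 1
--                     found_table_or_continuation = False
--
--                     while next_idx < len(lines):
--                         next_line = lines[next_idx]
--                         if next_line.strip().startswith('|'):
--                             # Found another table row - current line is continuation
--                             found_table_or_continuation = True
--                             break
--                         elif '|' in next_line:
--                             # Found a line with pipes - likely cell continuation chain
--                             found_table_or_continuation = True
--                             break
--                         elif next_line.strip() == '':
--                             # Empty line - check further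
--                             next_idx += 1
--                             continue
--                         else:
--                             # Non-table content - end of table row
--                             break
--
--                     if found_table_or_continuation:
--                         # Current line is part of the table row
--                         combined_row += ' ' + current_line.strip()
--                         i += 1
--                     else:
--                         # Current line is not part of table - end of this row
--                         break
--
--             result.append(combined_row)
--         else:
--             result.append(lines[i])
--             i += 1
--
--     return '\n'.join(result)
-- ===== SOURCE B (Python) =====
-- def _reorder_table_headings(markdown_content: str) -> str:
--     """Rejoin split table rows in one flat forward pass with a pending-row state,
--     using a precomputed backward pipe-lookahead table instead of A's nested look-ahead."""
--     lines = markdown_content.split('\n')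
--     # nxt[i]: does the first non-blank line at an index > i contain '|'?
--     nxt = []
--     carry = False
--     for line in reversed(lines):
--         nxt.append(carry)
--         if line.strip() != '':
--             carry = '|' in line
--     nxt.reverse()
--     out = []
--     pending = None  # the table row being assembled, if any
--     for line, nb in zip(lines, nxt):
--         s = line.strip()
--         if s.startswith('|'):
--             if pending is not None:
--                 out.append(pending)
--             pending = line
--         elif pending is None:
--             out.append(line)
--         elif '|' in line or (s != '' and nb):
--             pending += ' ' + s
--         else:
--             out.append(pending)
--             pending = None
--             out.append(line)
--     if pending is not None:
--         out.append(pending)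
--     return '\n'.join(out)
-- ===== Notes on version B (the rewrite author's own statement) =====
-- stated objective: alternative
-- what changed: A uses nested while-loops with an inner look-ahead re-scan for every continuation line; B precomputes a backward pipe-lookahead table and then does one flat forward pass over (line, bit) pairs carrying an optional pending row, flushing it on break or at the end.
import Mathlib
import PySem

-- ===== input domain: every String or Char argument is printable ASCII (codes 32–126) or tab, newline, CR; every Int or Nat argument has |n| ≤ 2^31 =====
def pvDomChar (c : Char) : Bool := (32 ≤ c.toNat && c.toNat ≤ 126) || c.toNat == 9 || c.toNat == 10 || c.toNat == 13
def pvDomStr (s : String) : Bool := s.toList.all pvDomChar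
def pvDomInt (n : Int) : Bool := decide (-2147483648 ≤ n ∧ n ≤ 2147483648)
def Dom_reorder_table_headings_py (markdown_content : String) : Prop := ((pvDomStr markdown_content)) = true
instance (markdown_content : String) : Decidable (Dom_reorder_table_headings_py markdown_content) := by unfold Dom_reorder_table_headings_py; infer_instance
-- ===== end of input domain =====

-- B replaces A's nested loops and look-ahead scan by a precomputed backward pipe-lookahead
-- table plus ONE flat forward fold carrying an optional pending row (alternative decomposition).
-- Both ports work on the List Char representation of each line (PySem.Chars, exact on ASCII).

-- ===== PORT A =====
-- A's look-ahead `while next_idx < len(lines)` scan, as a scan over lines[i+1:]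
def pvALookahead : List (List Char) → Bool
  | [] => false
  | l :: rest =>
    if PySem.Chars.startswith (PySem.Chars.strip l) ['|'] then true
    else if PySem.Chars.isIn ['|'] l then true
    else if PySem.Chars.strip l = [] then pvALookahead rest
    else false

-- A's inner `while` collecting continuation lines: (combined_row, remaining lines)
def pvAInner (row : List Char) : List (List Char) → List Char × List (List Char)
  | [] => (row, [])
  | l :: rest =>
    if PySem.Chars.startswith (PySem.Chars.strip l) ['|'] then (row, l :: rest)
    else if PySem.Chars.isIn ['|'] l then pvAInner (row ++ ' ' :: PySem.Chars.strip l) rest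
    else if PySem.Chars.strip l = [] then (row, l :: rest)
    else if pvALookahead rest then pvAInner (row ++ ' ' :: PySem.Chars.strip l) rest
    else (row, l :: rest)

-- needed by pvAOuter's termination
theorem pvAInner_len (row : List Char) (ls : List (List Char)) :
    (pvAInner row ls).2.length ≤ ls.length := by
  induction ls generalizing row with
  | nil => simp [pvAInner]
  | cons l rest ih =>
    simp only [pvAInner]
    split_ifs <;> simp <;> exact le_trans (ih _) (Nat.le_succ _)

-- A's outer `while i < len(lines)` loop
def pvAOuter : List (List Char) → List (List Char)
  | [] => []
  | l :: rest =>
    if PySem.Chars.startswith (PySem.Chars.strip l) ['|'] then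
      (pvAInner l rest).1 :: pvAOuter (pvAInner l rest).2
    else l :: pvAOuter rest
termination_by ls => ls.length
decreasing_by
  · exact Nat.lt_succ_of_le (pvAInner_len l rest)
  · simp

def reorder_table_headings_py (markdown_content : String) : String :=
  String.ofList (PySem.Chars.join ['\n']
    (pvAOuter (PySem.Chars.splitOn markdown_content.toList ['\n'])))

-- ===== PORT B =====
-- B's backward pass: nxt[i] = does the first non-blank line at index > i contain '|'?
-- (the Python appends the carry while walking reversed(lines), then reverses)
def pvBNxt (lines : List (List Char)) : List Bool :=
  (lines.reverse.foldl
    (fun (st : List Bool × Bool) l =>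
      (st.1 ++ [st.2],
       if PySem.Chars.strip l = [] then st.2 else PySem.Chars.isIn ['|'] l))
    ([], false)).1.reverse

-- B's loop body: state = (output so far, optional pending row); input = (line, nxt bit)
def pvBStep (st : List (List Char) × Option (List Char)) (p : List Char × Bool) :
    List (List Char) × Option (List Char) :=
  let s := PySem.Chars.strip p.1
  if PySem.Chars.startswith s ['|'] then
    (match st.2 with | some r => st.1 ++ [r] | none => st.1, some p.1)
  else
    match st.2 with
    | none => (st.1 ++ [p.1], none)
    | some r =>
      if PySem.Chars.isIn ['|'] p.1 || (decide (s ≠ []) && p.2) then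
        (st.1, some (r ++ ' ' :: s))
      else (st.1 ++ [r, p.1], none)

-- B's single forward pass, then the final flush of a pending row
def pvBRun (lines : List (List Char)) : List (List Char) :=
  let st := (lines.zip (pvBNxt lines)).foldl pvBStep ([], none)
  match st.2 with | some r => st.1 ++ [r] | none => st.1

def reorder_table_headings_py_alt (markdown_content : String) : String :=
  String.ofList (PySem.Chars.join ['\n']
    (pvBRun (PySem.Chars.splitOn markdown_content.toList ['\n'])))

-- ===== PRECONDITION & SPEC =====
def Spec_reorder_table_headings_py (markdown_content : String) (out : String) : Prop := out = reorder_table_headings_py_alt markdown_content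
instance (markdown_content : String) (out : String) : Decidable (Spec_reorder_table_headings_py markdown_content out) := by unfold Spec_reorder_table_headings_py; infer_instance

-- ===== CLAIM (what is proved, stated in full; the proofs are below) =====
def Claim_equal_reorder_table_headings_py : Prop := ∀ (markdown_content : String), Dom_reorder_table_headings_py markdown_content → Spec_reorder_table_headings_py markdown_content (reorder_table_headings_py markdown_content)

-- ===== LEMMAS AND PROOFS =====

theorem pv_mem_dropWhile {a : Char} {l : List Char} (h : a ∈ l)
    (hp : PySem.Chars.isspace a = false) : a ∈ l.dropWhile PySem.Chars.isspace := by
  induction l with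
  | nil => cases h
  | cons x xs ih =>
    by_cases hx : PySem.Chars.isspace x = true
    · simp [hx]
      rcases List.mem_cons.1 h with rfl | hm
      · rw [hx] at hp; cases hp
      · exact ih hm
    · simpa [List.dropWhile_cons, hx] using h

theorem pv_mem_strip {a : Char} {l : List Char} (h : a ∈ l)
    (hp : PySem.Chars.isspace a = false) : a ∈ PySem.Chars.strip l := by
  unfold PySem.Chars.strip PySem.Chars.rstrip PySem.Chars.lstrip
  rw [List.mem_reverse]
  exact pv_mem_dropWhile (by rw [List.mem_reverse]; exact pv_mem_dropWhile h hp) hp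

theorem pv_isIn_false_of_strip_nil {l : List Char}
    (h : PySem.Chars.strip l = []) : PySem.Chars.isIn ['|'] l = false := by
  rw [PySem.Chars.isIn_eq_false_iff]
  intro hm
  rw [List.singleton_infix_iff] at hm
  have := pv_mem_strip hm (by decide)
  rw [h] at this; cases this

theorem pv_starts_false_of_strip_nil {l : List Char}
    (h : PySem.Chars.strip l = []) :
    PySem.Chars.startswith (PySem.Chars.strip l) ['|'] = false := by
  rw [h]; decide

theorem pv_mem_of_mem_strip {a : Char} {l : List Char}
    (h : a ∈ PySem.Chars.strip l) : a ∈ l := by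
  unfold PySem.Chars.strip PySem.Chars.rstrip PySem.Chars.lstrip at h
  rw [List.mem_reverse] at h
  have h1 := (List.dropWhile_sublist _).mem h
  rw [List.mem_reverse] at h1
  exact (List.dropWhile_sublist _).mem h1

theorem pv_isIn_of_starts {l : List Char}
    (h : PySem.Chars.startswith (PySem.Chars.strip l) ['|'] = true) :
    PySem.Chars.isIn ['|'] l = true := by
  rw [PySem.Chars.startswith_iff] at h
  have hm : '|' ∈ PySem.Chars.strip l := h.mem (List.mem_singleton_self _)
  rw [PySem.Chars.isIn_iff_infix, List.singleton_infix_iff]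
  exact pv_mem_of_mem_strip hm

-- the backward-pass carry equals A's look-ahead on the whole list
theorem pv_nxt_carry (ls : List (List Char)) :
    (ls.reverse.foldl
      (fun (st : List Bool × Bool) l =>
        (st.1 ++ [st.2],
         if PySem.Chars.strip l = [] then st.2 else PySem.Chars.isIn ['|'] l))
      ([], false)).2 = pvALookahead ls := by
  induction ls with
  | nil => rfl
  | cons l rest ih =>
    rw [List.reverse_cons, List.foldl_append, List.foldl_cons, List.foldl_nil]
    dsimp only
    simp only [pvALookahead]
    by_cases hs : PySem.Chars.strip l = []
    · rw [if_pos hs, pv_starts_false_of_strip_nil hs, pv_isIn_false_of_strip_nil hs]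
      simp only [Bool.false_eq_true, if_false, if_pos hs]
      exact ih
    · rw [if_neg hs]
      by_cases hp : PySem.Chars.startswith (PySem.Chars.strip l) ['|'] = true
      · rw [hp, pv_isIn_of_starts hp]; simp
      · simp only [Bool.not_eq_true] at hp
        rw [hp]
        simp only [Bool.false_eq_true, if_false, if_neg hs]
        cases PySem.Chars.isIn ['|'] l <;> rfl

theorem pv_nxt_cons (l : List Char) (rest : List (List Char)) :
    pvBNxt (l :: rest) = pvALookahead rest :: pvBNxt rest := by
  unfold pvBNxt
  rw [List.reverse_cons, List.foldl_append, List.foldl_cons, List.foldl_nil]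
  dsimp only
  rw [List.reverse_append, pv_nxt_carry]
  rfl

-- the zipped stream peels off one (line, look-ahead bit) pair at a time
theorem pv_zip_cons (l : List Char) (rest : List (List Char)) :
    (l :: rest).zip (pvBNxt (l :: rest))
      = (l, pvALookahead rest) :: rest.zip (pvBNxt rest) := by
  rw [pv_nxt_cons]; rfl

-- A's result continued from an optional pending row
def pvACont : Option (List Char) → List (List Char) → List (List Char)
  | none, ls => pvAOuter ls
  | some r, ls => (pvAInner r ls).1 :: pvAOuter (pvAInner r ls).2

-- main invariant: B's flat fold from any state computes A's nested loops
theorem pv_fold_eq (ls : List (List Char)) :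
    ∀ (pending : Option (List Char)) (out : List (List Char)),
    (match (List.foldl pvBStep (out, pending) (ls.zip (pvBNxt ls))).2 with
      | some r => (List.foldl pvBStep (out, pending) (ls.zip (pvBNxt ls))).1 ++ [r]
      | none => (List.foldl pvBStep (out, pending) (ls.zip (pvBNxt ls))).1)
      = out ++ pvACont pending ls := by
  induction ls with
  | nil =>
    intro pending out
    cases pending <;> simp [pvBNxt, pvACont, pvAOuter, pvAInner]
  | cons l rest ih =>
    intro pending out
    rw [pv_zip_cons, List.foldl_cons]
    by_cases hp : PySem.Chars.startswith (PySem.Chars.strip l) ['|'] = true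
    · cases pending with
      | none =>
        rw [show pvBStep (out, none) (l, pvALookahead rest) = (out, some l) by
              simp [pvBStep, hp]]
        rw [ih (some l) out]
        simp only [pvACont, pvAOuter, hp, if_pos]
      | some r =>
        rw [show pvBStep (out, some r) (l, pvALookahead rest) = (out ++ [r], some l) by
              simp [pvBStep, hp]]
        rw [ih (some l) (out ++ [r])]
        simp only [pvACont, pvAInner, hp, if_pos, pvAOuter]
        simp
    · simp only [Bool.not_eq_true] at hp
      cases pending with
      | none =>
        rw [show pvBStep (out, none) (l, pvALookahead rest) = (out ++ [l], none) by
              simp [pvBStep, hp]]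
        rw [ih none (out ++ [l])]
        simp only [pvACont, pvAOuter, hp]
        simp
      | some r =>
        by_cases habs : (PySem.Chars.isIn ['|'] l
            || (decide (PySem.Chars.strip l ≠ []) && pvALookahead rest)) = true
        · rw [show pvBStep (out, some r) (l, pvALookahead rest)
                = (out, some (r ++ ' ' :: PySem.Chars.strip l)) by
              simp only [pvBStep, hp, Bool.false_eq_true, if_false]
              rw [if_pos habs]]
          rw [ih (some (r ++ ' ' :: PySem.Chars.strip l)) out]
          rcases Bool.or_eq_true_iff.1 habs with hin | hcond
          · simp only [pvACont, pvAInner, hp, Bool.false_eq_true, if_false, hin, if_pos]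
          · rw [Bool.and_eq_true, decide_eq_true_iff] at hcond
            simp only [pvACont, pvAInner, hp, Bool.false_eq_true, if_false]
            by_cases hin : PySem.Chars.isIn ['|'] l = true
            · simp only [hin, if_pos]
            · simp only [Bool.not_eq_true] at hin
              simp only [hin, Bool.false_eq_true, if_false, hcond.1, hcond.2, if_pos]
        · simp only [Bool.not_eq_true] at habs
          rw [show pvBStep (out, some r) (l, pvALookahead rest) = (out ++ [r, l], none) by
              simp only [pvBStep, hp, Bool.false_eq_true, if_false]
              rw [if_neg (by rw [habs]; exact Bool.false_ne_true)]]
          rw [ih none (out ++ [r, l])]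
          rw [Bool.or_eq_false_iff, Bool.and_eq_false_iff] at habs
          obtain ⟨hin, hc⟩ := habs
          simp only [pvACont, pvAInner, hp, Bool.false_eq_true, if_false, hin]
          rcases hc with hc | hc
          · rw [decide_eq_false_iff_not, not_not] at hc
            simp only [hc, if_pos, pvAOuter]
            simp
            intro h; exact absurd h (by decide)
          · by_cases hs : PySem.Chars.strip l = []
            · simp only [hs, if_pos, pvAOuter]
              simp
              intro h; exact absurd h (by decide)
            · simp only [hc, Bool.false_eq_true, if_false]
              simp only [hs]
              simp [pvAOuter, hp]

theorem pv_run_eq (ls : List (List Char)) : pvBRun ls = pvAOuter ls := by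
  have h := pv_fold_eq ls none []
  simpa [pvBRun, pvACont] using h

-- ===== VERDICT (by name: the statement is the Claim_ definition above) =====
theorem reorder_table_headings_py_spec : Claim_equal_reorder_table_headings_py := by
  intro s _
  unfold Spec_reorder_table_headings_py reorder_table_headings_py reorder_table_headings_py_alt
  rw [pv_run_eq]
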